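-- pv_equiv track=rewrite | github.com/muhammadazizbeck/Leetcode-Solutions | Data Structures/String/(EX3750)Minimum-Number-Of-Flips-To-Reverse-Binary-String.py | minimumFlips
-- ===== SOURCE A (Python) =====
-- def minimumFlips(n: int) -> int:
--     repr = bin(n)[2:]
--     rrepr = repr[::-1]
--     count = 0
--
--     for index in range(len(repr)):
--         if repr[index]!=rrepr[index]:
--             count += 1
--         else:
--             continue
--
--     return count
-- ===== SOURCE B (Python) =====
-- def minimumFlips(n: int) -> int:
--     s = bin(n)[2:]
--     left, right = 0, len(s) - 1
--     pairs = 0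
--     while left < right:
--         if s[left] != s[right]:
--             pairs += 1
--         left += 1
--         right -= 1
--     return 2 * pairs
-- ===== Notes on version B (the rewrite author's own statement) =====
-- stated objective: alternative
-- what changed: Replaces the full scan of the string against its materialised reverse by a two-pointer walk over only the first half, counting mismatched symmetric pairs once and returning twice the pair count (the middle character never mismatches itself).
import Mathlib
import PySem

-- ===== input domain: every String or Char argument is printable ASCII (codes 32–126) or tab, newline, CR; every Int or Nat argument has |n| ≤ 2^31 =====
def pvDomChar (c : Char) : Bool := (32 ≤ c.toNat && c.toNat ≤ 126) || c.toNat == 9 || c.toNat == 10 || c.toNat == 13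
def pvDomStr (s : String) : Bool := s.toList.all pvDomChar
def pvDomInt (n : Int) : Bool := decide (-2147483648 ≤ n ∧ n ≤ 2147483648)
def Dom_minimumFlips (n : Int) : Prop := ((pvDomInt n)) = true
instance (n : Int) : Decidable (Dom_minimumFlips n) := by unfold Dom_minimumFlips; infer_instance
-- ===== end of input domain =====

-- B replaces the full scan against a materialised reversed copy by a two-pointer walk over
-- the first half of bin(n)[2:], returning twice the mismatched-pair count (alternative decomposition).


-- ===== PORT A =====
def minimumFlips (n : Int) : Int :=
  let rep := PySem.List.slice (PySem.Int.toBinChars0b n) (some 2) none   -- bin(n)[2:]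
  let rrep := (PySem.List.slice? rep none none (-1)).getD []             -- rep[::-1] (step ≠ 0: never raises)
  (PySem.List.pyRange 0 (rep.length : Int) 1).foldl
    (fun count index =>
      if PySem.List.pyGetD rep index ' ' != PySem.List.pyGetD rrep index ' ' then count + 1
      else count) 0

-- ===== PORT B =====
-- the while-loop of Source B: left/right pointers moving inward, counting mismatched pairs
def pvBLoop (s : List Char) (left right pairs : Int) : Int :=
  if left < right then
    pvBLoop s (left + 1) (right - 1)
      (if PySem.List.pyGetD s left ' ' != PySem.List.pyGetD s right ' ' then pairs + 1 else pairs)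
  else pairs
termination_by (right - left).toNat
decreasing_by omega

def minimumFlips_alt (n : Int) : Int :=
  let s := PySem.List.slice (PySem.Int.toBinChars0b n) (some 2) none     -- bin(n)[2:]
  2 * pvBLoop s 0 ((s.length : Int) - 1) 0

-- ===== PRECONDITION & SPEC =====
def Spec_minimumFlips (n : Int) (out : Int) : Prop := out = minimumFlips_alt n
instance (n : Int) (out : Int) : Decidable (Spec_minimumFlips n out) := by unfold Spec_minimumFlips; infer_instance

-- ===== CLAIM (what is proved, stated in full; the proofs are below) =====
def Claim_equal_minimumFlips : Prop := ∀ (n : Int), Dom_minimumFlips n → Spec_minimumFlips n (minimumFlips n)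

-- ===== LEMMAS AND PROOFS =====

-- A's loop, characterised as countP over the index range
def pvCnt (s : List Char) : Nat :=
  (List.range s.length).countP
    (fun i : Nat => PySem.List.pyGetD s (i : Int) ' ' != PySem.List.pyGetD s.reverse (i : Int) ' ')

lemma pvA_eq_cnt (s : List Char) :
    (PySem.List.pyRange 0 (s.length : Int) 1).foldl
      (fun count index =>
        if PySem.List.pyGetD s index ' ' != PySem.List.pyGetD s.reverse index ' ' then count + 1
        else count) 0 = (pvCnt s : Int) := by
  rw [PySem.List.pyRange_zero_natCast, List.foldl_map, PySem.List.foldl_count_if]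
  simp only [pvCnt, zero_add]

lemma pvBLoop_acc (k : Nat) : ∀ (s : List Char) (l r p : Int), (r - l).toNat = k →
    pvBLoop s l r p = p + pvBLoop s l r 0 := by
  induction k using Nat.strong_induction_on with
  | _ k ih =>
    intro s l r p hk
    by_cases h : l < r
    · rw [pvBLoop]; conv_rhs => rw [pvBLoop]
      simp only [if_pos h]
      have h2 : ((r - 1) - (l + 1)).toNat < k := by omega
      rw [ih _ h2 s (l+1) (r-1) _ rfl,
          ih _ h2 s (l+1) (r-1) (if PySem.List.pyGetD s l ' ' != PySem.List.pyGetD s r ' ' then 0 + 1 else 0) rfl]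
      split_ifs <;> ring
    · rw [pvBLoop]; conv_rhs => rw [pvBLoop]
      simp only [if_neg h]; ring

lemma pvGetD_inner (x y : Char) (t : List Char) (i : Int)
    (h1 : 1 ≤ i) (h2 : i ≤ (t.length : Int)) :
    PySem.List.pyGetD (x :: t ++ [y]) i ' ' = PySem.List.pyGetD t (i - 1) ' ' := by
  have hlen : (x :: t ++ [y]).length = t.length + 2 := by simp
  have hk2 : (i - 1).toNat < t.length := by omega
  rw [PySem.List.pyGetD_eq_getElem _ ' ' (by omega) (by rw [hlen]; push_cast; omega),
      PySem.List.pyGetD_eq_getElem _ ' ' (by omega) (by omega)]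
  have hk : i.toNat = (i - 1).toNat + 1 := by omega
  simp only [hk]
  exact List.getElem_append_left hk2

lemma pvBLoop_shift (k : Nat) : ∀ (x y : Char) (t : List Char) (l r p : Int), (r - l).toNat = k →
    1 ≤ l → r ≤ (t.length : Int) →
    pvBLoop (x :: t ++ [y]) l r p = pvBLoop t (l - 1) (r - 1) p := by
  induction k using Nat.strong_induction_on with
  | _ k ih =>
    intro x y t l r p hk hl hr
    by_cases h : l < r
    · rw [pvBLoop]; conv_rhs => rw [pvBLoop]
      simp only [if_pos h, if_pos (show l - 1 < r - 1 by omega)]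
      rw [pvGetD_inner x y t l hl (by omega), pvGetD_inner x y t r (by omega) hr]
      rw [ih (((r-1) - (l+1)).toNat) (by omega) x y t (l+1) (r-1)
            (if PySem.List.pyGetD t (l-1) ' ' != PySem.List.pyGetD t (r-1) ' ' then p + 1 else p)
            rfl (by omega) (by omega)]
      norm_num
    · rw [pvBLoop]; conv_rhs => rw [pvBLoop]
      simp only [if_neg h, if_neg (show ¬ (l - 1 < r - 1) by omega)]

lemma pvGetD_last (a b : Char) (u : List Char) :
    PySem.List.pyGetD (a :: u ++ [b]) ((u.length + 1 : Nat) : Int) ' ' = b := by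
  rw [PySem.List.pyGetD_natCast]
  have h : a :: u ++ [b] = (a :: u) ++ [b] := by simp
  rw [h, List.getD_eq_getElem?_getD, show u.length + 1 = (a :: u).length from by simp,
      List.getElem?_concat_length]
  rfl

lemma pvCnt_cons_append (x y : Char) (t : List Char) :
    pvCnt (x :: t ++ [y]) = pvCnt t + (if x = y then 0 else 2) := by
  have hrev : (x :: t ++ [y]).reverse = y :: t.reverse ++ [x] := by simp
  have hlen : (x :: t ++ [y]).length = t.length + 2 := by simp
  unfold pvCnt
  rw [hrev, hlen]
  rw [show t.length + 2 = (t.length + 1) + 1 from rfl, List.range_succ_eq_map, List.range_succ]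
  rw [List.countP_cons, List.countP_map, List.countP_append]
  -- head term
  have h0 : (PySem.List.pyGetD (x :: t ++ [y]) ((0:Nat) : Int) ' ' != PySem.List.pyGetD (y :: t.reverse ++ [x]) ((0:Nat) : Int) ' ') = (x != y) := by
    simp [PySem.List.pyGetD_zero_cons]
  -- last term
  have hN : (PySem.List.pyGetD (x :: t ++ [y]) ((t.length + 1 : Nat) : Int) ' ' != PySem.List.pyGetD (y :: t.reverse ++ [x]) ((t.length + 1 : Nat) : Int) ' ') = (y != x) := by
    rw [pvGetD_last x y t, show (t.length:Nat) + 1 = t.reverse.length + 1 from by simp, pvGetD_last y x t.reverse]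
  -- middle terms
  have hmid : List.countP ((fun i => PySem.List.pyGetD (x :: t ++ [y]) ((i:Nat) : Int) ' ' != PySem.List.pyGetD (y :: t.reverse ++ [x]) ((i:Nat) : Int) ' ') ∘ (fun k => k + 1)) (List.range t.length) = pvCnt t := by
    unfold pvCnt
    apply List.countP_congr
    intro j hj
    have hj' : j < t.length := List.mem_range.mp hj
    simp only [Function.comp]
    rw [pvGetD_inner x y t _ (by omega) (by push_cast; omega),
        pvGetD_inner y x t.reverse _ (by omega) (by simp; omega)]
    have h1 : ((j:Int) + 1) - 1 = (j : Int) := by omega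
    push_cast
    rw [h1]
  rw [List.countP_singleton, hmid]
  simp only [Function.comp_apply, Nat.succ_eq_add_one, h0, hN]
  unfold pvCnt
  by_cases hxy : x = y
  · simp [hxy]
  · have hyx : y ≠ x := fun h => hxy h.symm
    simp [hxy, hyx, bne_iff_ne]


lemma pvMain (s : List Char) : (pvCnt s : Int) = 2 * pvBLoop s 0 ((s.length : Int) - 1) 0 := by
  induction s using List.bidirectionalRec with
  | nil =>
    rw [pvBLoop]; simp [pvCnt]
  | singleton a =>
    rw [pvBLoop]; simp [pvCnt]
  | cons_append x t y ih =>
    rw [← List.cons_append]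
    have hlen : (x :: t ++ [y]).length = t.length + 2 := by simp
    rw [pvCnt_cons_append, hlen]
    rw [pvBLoop, if_pos (show (0:Int) < ((t.length + 2 : Nat):Int) - 1 by push_cast; omega)]
    have e1 : ((t.length + 2 : Nat):Int) - 1 = ((t.length + 1 : Nat) : Int) := by push_cast; omega
    rw [e1]
    have h0 : PySem.List.pyGetD (x :: t ++ [y]) 0 ' ' = x := by
      rw [List.cons_append, PySem.List.pyGetD_zero_cons]
    rw [h0, pvGetD_last x y t]
    rw [pvBLoop_shift (((((t.length + 1 : Nat):Int) - 1) - (0 + 1)).toNat) x y t (0 + 1)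
          (((t.length + 1 : Nat):Int) - 1) _ rfl (by omega) (by push_cast; omega)]
    have e2 : ((0:Int) + 1) - 1 = 0 := by ring
    have e3 : (((t.length + 1 : Nat):Int) - 1) - 1 = (t.length : Int) - 1 := by push_cast; omega
    rw [e2, e3]
    rw [pvBLoop_acc ((((t.length : Int) - 1) - 0).toNat) t 0 ((t.length : Int) - 1) _ rfl]
    by_cases hxy : x = y
    · subst hxy
      simpa using ih
    · have hb : (x != y) = true := bne_iff_ne.mpr hxy
      simp only [hb, if_true, if_neg hxy]
      push_cast
      rw [ih]
      ring

-- ===== VERDICT (by name: the statement is the Claim_ definition above) =====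
theorem minimumFlips_spec : Claim_equal_minimumFlips := by
  intro n _
  unfold Spec_minimumFlips minimumFlips minimumFlips_alt
  simp only [PySem.List.slice?_none_none_neg_one, Option.getD_some]
  rw [pvA_eq_cnt, pvMain]
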